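-- pv_equiv track=rewrite | github.com/jguida941/voiceterm | dev/scripts/checks/tandem_consistency/report.py | _role_summary
-- ===== SOURCE A (Python) =====
-- def _role_summary(checks: list[dict[str, object]]) -> dict[str, str]:
--     roles: dict[str, list[bool]] = {}
--     for check in checks:
--         role = str(check.get("role", "system"))
--         roles.setdefault(role, []).append(bool(check.get("ok", False)))
--     return {
--         role: "healthy" if all(results) else "degraded"
--         for role, results in sorted(roles.items())
--     }
-- ===== SOURCE B (Python) =====
-- def _role_summary(checks: list[dict[str, object]]) -> dict[str, str]:
--     bad = {str(c.get("role", "system")) for c in checks if not bool(c.get("ok", False))}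
--     roles = {str(c.get("role", "system")) for c in checks}
--     return {r: ("degraded" if r in bad else "healthy") for r in sorted(roles)}
-- ===== Notes on version B (the rewrite author's own statement) =====
-- stated objective: alternative
-- what changed: B replaces the dict-of-bool-lists plus all() reduction with two set comprehensions (roles seen, roles with a failing check) and decides health by set membership over the sorted role names.
import Mathlib
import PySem

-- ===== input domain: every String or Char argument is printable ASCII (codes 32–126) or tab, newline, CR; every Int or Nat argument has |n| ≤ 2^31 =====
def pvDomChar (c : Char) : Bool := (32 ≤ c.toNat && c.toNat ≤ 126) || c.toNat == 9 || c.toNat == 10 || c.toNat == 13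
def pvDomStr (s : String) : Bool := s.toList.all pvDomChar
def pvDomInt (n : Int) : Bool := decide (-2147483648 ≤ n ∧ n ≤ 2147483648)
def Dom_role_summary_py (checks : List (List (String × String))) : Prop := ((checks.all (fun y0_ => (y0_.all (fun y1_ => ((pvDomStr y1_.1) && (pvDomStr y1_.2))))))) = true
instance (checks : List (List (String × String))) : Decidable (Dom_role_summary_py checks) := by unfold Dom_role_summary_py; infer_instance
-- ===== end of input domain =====

-- B replaces A's dict of bool-lists reduced with all() by two role sets (seen / failing) and a
-- membership test over the sorted role names; same cost, different state maintained (objective: alternative).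

-- shared helpers: role = str(check.get("role","system")); ok = bool(check.get("ok", False))
-- (values are strings under the type convention; bool(s) is s ≠ "")
def pvRole (c : List (String × String)) : String := (PySem.Dict.mk c).getD "role" "system"

def pvOk (c : List (String × String)) : Bool := ((PySem.Dict.mk c).getD "ok" "") != ""

-- ===== PORT A =====
-- sorted(roles.items()) compares (key, value) tuples; keys are unique so ordering by the key alone is exact
def role_summary_py (checks : List (List (String × String))) : List (String × String) :=
  let roles : PySem.Dict String (List Bool) :=
    checks.foldl (fun d c => d.modify (pvRole c) [] (fun xs => xs ++ [pvOk c])) PySem.Dict.empty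
  (PySem.List.sorted roles.items (fun p => p.1)).map
    (fun p => (p.1, if p.2.all (fun b => b) then "healthy" else "degraded"))

-- ===== PORT B =====
def role_summary_py_alt (checks : List (List (String × String))) : List (String × String) :=
  let bad : PySem.Set String := PySem.Set.ofList ((checks.filter (fun c => !(pvOk c))).map pvRole)
  let roles : PySem.Set String := PySem.Set.ofList (checks.map pvRole)
  (PySem.List.sorted roles (fun r => r)).map
    (fun r => (r, if r ∈ bad then "degraded" else "healthy"))

-- ===== PRECONDITION & SPEC =====
def Spec_role_summary_py (checks : List (List (String × String))) (out : List (String × String)) : Prop := out = role_summary_py_alt checks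
instance (checks : List (List (String × String))) (out : List (String × String)) : Decidable (Spec_role_summary_py checks out) := by unfold Spec_role_summary_py; infer_instance

-- ===== CLAIM (what is proved, stated in full; the proofs are below) =====
def Claim_equal_role_summary_py : Prop := ∀ (checks : List (List (String × String))), Dom_role_summary_py checks → Spec_role_summary_py checks (role_summary_py checks)

-- ===== LEMMAS AND PROOFS =====

-- keys of insert = Set.add of the keys
theorem pv_contains_eq_keys {ν : Type} (d : PySem.Dict String ν) (k : String) :
    d.contains k = PySem.Set.contains d.keys k := by
  simp [PySem.Dict.contains, PySem.Set.contains, PySem.Dict.keys, List.any_eq]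

theorem pv_keys_insert_add {ν : Type} (d : PySem.Dict String ν) (k : String) (v : ν) :
    (d.insert k v).keys = PySem.Set.add d.keys k := by
  by_cases h : d.contains k = true
  · rw [PySem.Dict.insert, if_pos h, PySem.Set.add,
      if_pos ((pv_contains_eq_keys d k).symm.trans h)]
    show List.map _ _ = _
    rw [List.map_map]
    apply List.map_congr_left
    intro p _
    by_cases hp : p.1 = k <;> simp [hp]
  · rw [PySem.Dict.insert, if_neg h, PySem.Set.add,
      if_neg (fun hx => h ((pv_contains_eq_keys d k).trans hx))]
    show List.map _ _ = _
    simp [PySem.Dict.keys]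

theorem pv_keys_modify_add {ν : Type} (d : PySem.Dict String ν) (k : String) (d0 : ν) (f : ν → ν) :
    (d.modify k d0 f).keys = PySem.Set.add d.keys k := by
  unfold PySem.Dict.modify; exact pv_keys_insert_add ..

-- keys of A's grouping fold, generalized over the starting dict
theorem pv_keys_fold (l : List (List (String × String))) (d : PySem.Dict String (List Bool)) :
    (l.foldl (fun d c => d.modify (pvRole c) [] (fun xs => xs ++ [pvOk c])) d).keys
      = PySem.Set.update d.keys (l.map pvRole) := by
  induction l generalizing d with
  | nil => rfl
  | cons c t ih =>
      simp only [List.foldl_cons, List.map_cons]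
      rw [ih, pv_keys_modify_add]
      rfl

-- value of A's grouping fold at a key
theorem pv_getD_fold (checks : List (List (String × String))) (r : String) :
    ((checks.foldl (fun d c => d.modify (pvRole c) [] (fun xs => xs ++ [pvOk c]))
        (PySem.Dict.empty : PySem.Dict String (List Bool))).getD r [])
      = ((checks.map (fun c => (pvRole c, pvOk c))).filter (fun p => p.1 == r)).map (fun p => p.2) := by
  have h := PySem.Dict.getD_foldl_modify_append
    (checks.map (fun c => (pvRole c, pvOk c))) (PySem.Dict.empty : PySem.Dict String (List Bool)) r
  rw [List.foldl_map] at h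
  simpa using h

-- pointwise: A's all(results) test agrees with B's bad-set membership, for every role name
theorem pv_pointwise (checks : List (List (String × String))) (r : String) :
    (r, if (((checks.map (fun c => (pvRole c, pvOk c))).filter (fun p => p.1 == r)).map (fun p => p.2)).all (fun b => b)
          then "healthy" else ("degraded" : String))
    = (r, if r ∈ PySem.Set.ofList ((checks.filter (fun c => !(pvOk c))).map pvRole)
          then "degraded" else ("healthy" : String)) := by
  have hmem : (r ∈ PySem.Set.ofList ((checks.filter (fun c => !(pvOk c))).map pvRole))
      ↔ ∃ c ∈ checks, pvOk c = false ∧ pvRole c = r := by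
    rw [PySem.Set.mem_ofList]
    simp [List.mem_map, List.mem_filter]
    tauto
  have hall : ((((checks.map (fun c => (pvRole c, pvOk c))).filter (fun p => p.1 == r)).map (fun p => p.2)).all (fun b => b) = true)
      ↔ ∀ c ∈ checks, pvRole c = r → pvOk c = true := by
    simp [List.all_eq_true]
    constructor
    · intro h c hc hr
      rcases h c hc with h' | h'
      · exact absurd hr h'
      · exact h'
    · intro h c hc
      by_cases hr : pvRole c = r
      · exact Or.inr (h c hc hr)
      · exact Or.inl hr
  by_cases hb : r ∈ PySem.Set.ofList ((checks.filter (fun c => !(pvOk c))).map pvRole)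
  · obtain ⟨c, hc, hok, hr⟩ := hmem.mp hb
    have : ¬ ((((checks.map (fun c => (pvRole c, pvOk c))).filter (fun p => p.1 == r)).map (fun p => p.2)).all (fun b => b) = true) := by
      rw [hall]; intro h; have := h c hc hr; simp [hok] at this
    simp only [hb, if_true]
    rw [if_neg (by simpa using this)]
  · have : (((checks.map (fun c => (pvRole c, pvOk c))).filter (fun p => p.1 == r)).map (fun p => p.2)).all (fun b => b) = true := by
      rw [hall]; intro c hc hr
      by_contra hok
      exact hb (hmem.mpr ⟨c, hc, Bool.eq_false_iff.mpr hok, hr⟩)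
    simp only [hb, if_false]
    rw [if_pos this]

-- ===== VERDICT (by name: the statement is the Claim_ definition above) =====
theorem role_summary_py_spec : Claim_equal_role_summary_py := by
  intro checks _
  unfold Spec_role_summary_py
  have hA : role_summary_py checks
      = (PySem.List.sorted ((checks.foldl (fun d c => d.modify (pvRole c) [] (fun xs => xs ++ [pvOk c])) (PySem.Dict.empty : PySem.Dict String (List Bool))).items) (fun p => p.1)).map
          (fun p => (p.1, if p.2.all (fun b => b) then "healthy" else "degraded")) := rfl
  have hB : role_summary_py_alt checks
      = (PySem.List.sorted (PySem.Set.ofList (checks.map pvRole)) (fun r => r)).map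
          (fun r => (r, if r ∈ PySem.Set.ofList ((checks.filter (fun c => !(pvOk c))).map pvRole) then "degraded" else "healthy")) := rfl
  rw [hA, hB]
  set d := checks.foldl (fun d c => d.modify (pvRole c) [] (fun xs => xs ++ [pvOk c]))
      (PySem.Dict.empty : PySem.Dict String (List Bool)) with hd
  have hkeys : d.keys = PySem.Set.ofList (checks.map pvRole) := by
    rw [hd, pv_keys_fold]; rfl
  have hnd : d.keys.Nodup := by rw [hkeys]; exact PySem.Set.nodup_ofList _
  have hitems : d.items = d.keys.map (fun k => (k, d.getD k [])) :=
    PySem.Dict.items_eq_map_keys d hnd []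
  -- sorted items by fst = map over sorted keys
  have hsorted : PySem.List.sorted d.items (fun p => p.1)
      = (PySem.List.sorted d.keys (fun k => k)).map (fun k => (k, d.getD k [])) := by
    apply PySem.List.sorted_eq_of_perm_of_pairwise_lt
    · rw [hitems]
      exact (PySem.List.sorted_perm d.keys (fun k => k) false).map _
    · have hp : List.Pairwise (fun a b => a < b) (PySem.List.sorted d.keys (fun k => k)) := by
        rw [hkeys]; exact PySem.List.sorted_ofList_pairwise_lt _
      exact hp.map _ (fun a b h => h)
  rw [hsorted, List.map_map, hkeys]
  apply List.map_congr_left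
  intro r _
  simp only [Function.comp]
  simp only [hd, pv_getD_fold]
  exact pv_pointwise checks r
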